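-- pv_equiv track=rewrite | github.com/TheHungryGuy/cs100 | Classwork/AntonioArce_lecture10_classwork.py | lengthFrequency
-- ===== SOURCE A (Python) =====
-- def lengthFrequency(text):
--     wordDict = {}
--     words = text.split()
--     for word in words:
--         if len(word) in wordDict:
--             wordDict[len(word)] += 1
--         else:
--             wordDict[len(word)] = 1
--
--     return wordDict
-- ===== SOURCE B (Python) =====
-- def lengthFrequency(text):
--     def go(lengths):
--         if not lengths:
--             return []
--         l = lengths[0]
--         rest = [x for x in lengths if x != l]
--         return [(l, len(lengths) - len(rest))] + go(rest)
--     return dict(go([len(w) for w in text.split()]))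
-- ===== Notes on version B (the rewrite author's own statement) =====
-- stated objective: alternative
-- what changed: Replaces A's single pass that increments a mutable dict per word with a recursive partition over the length list: take the first length, count its occurrences as the size drop after filtering them all out, recurse on the filtered remainder, and assemble the pairs into a dict at the end.
import Mathlib
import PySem

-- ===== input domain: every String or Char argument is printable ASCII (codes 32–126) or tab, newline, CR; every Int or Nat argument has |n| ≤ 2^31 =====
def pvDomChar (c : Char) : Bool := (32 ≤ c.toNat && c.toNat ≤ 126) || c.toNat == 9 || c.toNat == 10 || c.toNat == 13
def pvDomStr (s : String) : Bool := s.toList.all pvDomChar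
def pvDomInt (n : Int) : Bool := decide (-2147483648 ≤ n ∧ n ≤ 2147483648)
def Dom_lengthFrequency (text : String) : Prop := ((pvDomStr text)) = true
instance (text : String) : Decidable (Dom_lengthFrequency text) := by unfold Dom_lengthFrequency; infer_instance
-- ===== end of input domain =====

-- B replaces A's per-word dict increment loop by a recursive partition: take the first length,
-- count and remove all its occurrences by filtering, recurse on the remainder (objective: alternative).


-- ===== PORT A =====
def lengthFrequency (text : String) : List (Int × Int) :=
  let words := PySem.Str.split₀ text
  let wordDict := words.foldl (fun d w =>
      if d.contains (PySem.Str.len w) then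
        d.insert (PySem.Str.len w) (d.getD (PySem.Str.len w) 0 + 1)
      else
        d.insert (PySem.Str.len w) 1)
    PySem.Dict.empty
  wordDict.items

-- ===== PORT B =====
-- go(lengths): head length l, rest = everything ≠ l, emit (l, #removed) and recurse on rest.
def lfGo (xs : List Int) : List (Int × Int) :=
  match xs with
  | [] => []
  | l :: r =>
    let rest := (l :: r).filter (fun x => x != l)
    (l, ((l :: r).length : Int) - (rest.length : Int)) :: lfGo rest
termination_by xs.length
decreasing_by
  simp only [List.filter_cons, bne_self_eq_false, List.length_cons]
  exact Nat.lt_succ_of_le (List.length_filter_le _ _)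

def lengthFrequency_alt (text : String) : List (Int × Int) :=
  (PySem.Dict.ofList (lfGo ((PySem.Str.split₀ text).map (fun w => PySem.Str.len w)))).items

-- ===== PRECONDITION & SPEC =====
def Spec_lengthFrequency (text : String) (out : List (Int × Int)) : Prop := out = lengthFrequency_alt text
instance (text : String) (out : List (Int × Int)) : Decidable (Spec_lengthFrequency text out) := by unfold Spec_lengthFrequency; infer_instance

-- ===== CLAIM (what is proved, stated in full; the proofs are below) =====
def Claim_equal_lengthFrequency : Prop := ∀ (text : String), Dom_lengthFrequency text → Spec_lengthFrequency text (lengthFrequency text)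

-- ===== LEMMAS AND PROOFS =====

-- A's branching update collapses to the standard counter step.
theorem lfA_step (d : PySem.Dict Int Int) (l : Int) :
    (if d.contains l then d.insert l (d.getD l 0 + 1) else d.insert l 1)
      = d.insert l (d.getD l 0 + 1) := by
  by_cases h : d.contains l = true
  · simp [h]
  · have h' : d.contains l = false := by simpa using h
    simp [h', PySem.Dict.getD_of_not_contains d (0 : Int) h']

-- set(...) commutes with filtering (first-occurrence order is preserved).
theorem lf_ofList_filter (p : Int → Bool) (r : List Int) :
    PySem.Set.ofList (r.filter p) = (PySem.Set.ofList r).filter p := by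
  induction r with
  | nil => rfl
  | cons x r ih =>
    rw [PySem.Set.ofList_cons, List.filter_cons]
    by_cases hx : p x = true
    · rw [hx]
      simp only [List.filter_cons, hx, if_true]
      rw [PySem.Set.ofList_cons, ih]
      simp only [PySem.Set.discard, List.filter_filter]
      congr 1
      apply List.filter_congr
      intro y _
      simp [Bool.and_comm]
    · have hx' : p x = false := by simpa using hx
      rw [if_neg (by simp [hx'])]
      rw [ih]
      simp only [PySem.Set.discard]
      rw [List.filter_cons_of_neg (by simp [hx']), List.filter_filter]
      apply List.filter_congr
      intro y _
      by_cases hy : p y = true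
      · have hne : (y == x) = false := by
          cases hq : y == x
          · rfl
          · exact absurd hy (by rw [eq_of_beq hq, hx']; simp)
        simp [hy, hne]
      · simp [show p y = false by simpa using hy]

-- B's recursion produces exactly one (length, multiplicity) pair per distinct
-- length, in first-occurrence order.
theorem lfGo_eq_map (xs : List Int) :
    lfGo xs = (PySem.Set.ofList xs).map (fun k => (k, (xs.count k : Int))) := by
  induction xs using lfGo.induct with
  | case1 => simp [lfGo]
  | case2 l r rest ih =>
    rw [lfGo]
    have hrest : (l :: r).filter (fun x => x != l) = r.filter (fun x => x != l) := by
      simp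
    have hR : rest = r.filter (fun x => x != l) := hrest
    rw [hR] at ih
    rw [hrest]
    rw [ih, PySem.Set.ofList_cons, List.map_cons]
    congr 1
    · -- head pair: length − |rest| is the count of l
      have hlen : (l :: r).length =
          List.countP (fun x => x == l) (l :: r) + List.countP (fun x => x != l) (l :: r) := by
        have h0 := List.length_eq_countP_add_countP (fun x => x == l) (l := l :: r)
        rw [h0]
        congr 1
        apply List.countP_congr
        intro y _
        simp [bne]
      have hcount : (l :: r).count l = List.countP (fun x => x == l) (l :: r) := rfl
      have hfl : ((r.filter (fun x => x != l)).length : Nat)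
          = List.countP (fun x => x != l) (l :: r) := by
        rw [← hrest]
        exact Eq.symm List.countP_eq_length_filter
      have : ((l :: r).length : Int) - ((r.filter (fun x => x != l)).length : Int)
          = ((l :: r).count l : Int) := by
        rw [hfl, hcount]; omega
      rw [this]
    · -- tail: the filtered counts agree with the counts in the full list
      rw [lf_ofList_filter]
      have hdis : (PySem.Set.ofList r).discard l
          = (PySem.Set.ofList r).filter (fun x => x != l) := by
        simp [PySem.Set.discard, bne]
      rw [hdis]
      apply List.map_congr_left
      intro k hk
      have hkne : (k != l) = true := (List.mem_filter.1 hk).2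
      have hknel : k ≠ l := by simpa using hkne
      congr 1
      rw [List.count_filter (p := fun x => x != l) hkne]
      simp [List.count_cons]
      omega

-- ===== VERDICT (by name: the statement is the Claim_ definition above) =====
theorem lengthFrequency_spec : Claim_equal_lengthFrequency := by
  intro text _
  show lengthFrequency text = lengthFrequency_alt text
  unfold lengthFrequency lengthFrequency_alt
  simp only []
  -- A's loop is Counter(lengths)
  have hA : (PySem.Str.split₀ text).foldl (fun d w =>
      if d.contains (PySem.Str.len w) then
        d.insert (PySem.Str.len w) (d.getD (PySem.Str.len w) 0 + 1)
      else
        d.insert (PySem.Str.len w) 1) PySem.Dict.empty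
      = PySem.Dict.counter ((PySem.Str.split₀ text).map (fun w => PySem.Str.len w)) := by
    rw [← PySem.Dict.foldl_insert_getD_add_one_eq_counter, List.foldl_map]
    apply PySem.List.foldl_congr_mem
    intro d w _
    exact lfA_step d (PySem.Str.len w)
  rw [hA, PySem.Dict.items_counter]
  -- B's dict(pairs) with distinct keys lists exactly those pairs
  set xs := (PySem.Str.split₀ text).map (fun w => PySem.Str.len w) with hxs
  have hgo := lfGo_eq_map xs
  have hfresh : ∀ p ∈ lfGo xs, (PySem.Dict.empty : PySem.Dict Int Int).contains p.1 = false := by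
    intro p _; rfl
  have hnodup : ((lfGo xs).map Prod.fst).Nodup := by
    rw [hgo, List.map_map]
    have : (Prod.fst ∘ fun k => ((k : Int), (xs.count k : Int))) = id := by
      funext k; rfl
    rw [this, List.map_id]
    exact PySem.Set.nodup_ofList xs
  have hitems : (PySem.Dict.ofList (lfGo xs)).items
      = (PySem.Dict.empty : PySem.Dict Int Int).items
        ++ (lfGo xs).map (fun p => (p.1, p.2)) := by
    exact PySem.Dict.items_foldl_insert_fresh (lfGo xs) Prod.fst Prod.snd PySem.Dict.empty hfresh hnodup
  rw [hitems, hgo]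
  simp [PySem.Dict.empty, List.map_map]
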